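-- pv_equiv track=rewrite | github.com/RohitKumarSinha/leetcode_dsa | sumOfZeros.py | coverageOfMatrix
-- ===== SOURCE A (Python) =====
-- def coverageOfMatrix(mat):
--     # Write your code here.
--     rows = len(mat)
--     cols = len(mat[0])
--
--     count = 0
--
--     for i in range(0,rows):
--         for j in range(0,cols):
--             if (i - 1 >= 0 and mat[i - 1][j] == 1):
--                 count += 1
--
--             if (j + 1 < cols and mat[i][j + 1] == 1):
--                 count += 1
--
--             if (i + 1 < rows and mat[i + 1][j] == 1):
--                 count += 1
--
--             if (j - 1 >= 0 and mat[i][j - 1] == 1):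
--                 count += 1
--
--     return count
-- ===== SOURCE B (Python) =====
-- def coverageOfMatrix(mat):
--     # Sum the in-bounds orthogonal degree of every 1-valued cell, computed
--     # from the cell's position alone -- no neighbor values are ever read.
--     rows = len(mat)
--     cols = len(mat[0])
--     count = 0
--     for i in range(rows):
--         row = mat[i]
--         for j in range(cols):
--             if row[j] == 1:
--                 count += (i > 0) + (i < rows - 1) + (j > 0) + (j < cols - 1)
--     return count
-- ===== Notes on version B (the rewrite author's own statement) =====
-- stated objective: faster
-- what changed: Instead of testing each of the four neighbors of every cell for value 1, B sums the in-bounds orthogonal degree (i>0)+(i<rows-1)+(j>0)+(j<cols-1) of each 1-valued cell, reading no neighbor values; the totals agree because the in-grid adjacency relation is symmetric.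
import Mathlib
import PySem

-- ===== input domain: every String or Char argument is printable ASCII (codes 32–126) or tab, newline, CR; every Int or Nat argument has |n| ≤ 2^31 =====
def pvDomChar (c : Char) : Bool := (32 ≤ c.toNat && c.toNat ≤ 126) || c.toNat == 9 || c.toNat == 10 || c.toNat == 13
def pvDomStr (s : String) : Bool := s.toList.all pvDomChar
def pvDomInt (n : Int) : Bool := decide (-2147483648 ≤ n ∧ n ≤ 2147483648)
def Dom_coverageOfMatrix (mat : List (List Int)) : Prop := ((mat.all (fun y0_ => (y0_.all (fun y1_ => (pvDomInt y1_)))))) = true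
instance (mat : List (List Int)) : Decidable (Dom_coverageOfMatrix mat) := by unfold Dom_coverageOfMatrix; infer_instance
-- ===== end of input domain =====

-- B sums the in-bounds orthogonal degree of each 1-valued cell from its position alone
-- (never reading neighbor values) instead of A's four neighbor-value tests per cell; the
-- totals agree by symmetry of the in-grid adjacency relation (constant-factor faster:
-- one cell read instead of four neighbor reads per cell, measured).

-- ===== PORT A =====
-- mat[i][j]: every access either program makes is guarded in-bounds under Pre_, so the
-- default-valued total form is exact there.
def pvAt (mat : List (List Int)) (i j : Int) : Int :=
  PySem.List.pyGetD (PySem.List.pyGetD mat i []) j 0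

def coverageOfMatrix (mat : List (List Int)) : Int :=
  let rows : Int := mat.length
  let cols : Int := (PySem.List.pyGetD mat 0 []).length
  (PySem.List.pyRange 0 rows 1).foldl (fun count i =>
    (PySem.List.pyRange 0 cols 1).foldl (fun count j =>
      let count := if 0 ≤ i - 1 ∧ pvAt mat (i-1) j = 1 then count + 1 else count
      let count := if j + 1 < cols ∧ pvAt mat i (j+1) = 1 then count + 1 else count
      let count := if i + 1 < rows ∧ pvAt mat (i+1) j = 1 then count + 1 else count
      if 0 ≤ j - 1 ∧ pvAt mat i (j-1) = 1 then count + 1 else count) count) 0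

-- ===== PORT B =====
def coverageOfMatrix_alt (mat : List (List Int)) : Int :=
  let rows : Int := mat.length
  let cols : Int := (PySem.List.pyGetD mat 0 []).length
  (PySem.List.pyRange 0 rows 1).foldl (fun count i =>
    let row := PySem.List.pyGetD mat i []
    (PySem.List.pyRange 0 cols 1).foldl (fun count j =>
      if PySem.List.pyGetD row j 0 = 1 then
        count + ((if 0 < i then 1 else 0) + (if i < rows - 1 then 1 else 0)
               + (if 0 < j then 1 else 0) + (if j < cols - 1 then 1 else 0))
      else count) count) 0

-- ===== PRECONDITION & SPEC =====
-- Pre_: mat nonempty and no row shorter than row 0 — exactly the inputs on which the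
-- Python A (and B) returns; on an empty mat or any row shorter than row 0 both raise IndexError.
def Pre_coverageOfMatrix (mat : List (List Int)) : Prop :=
  mat ≠ [] ∧ ∀ r ∈ mat, mat.headI.length ≤ r.length
instance (mat : List (List Int)) : Decidable (Pre_coverageOfMatrix mat) := by
  unfold Pre_coverageOfMatrix; infer_instance

def pvWitness_coverageOfMatrix : List (List Int) := [[1, 0, 1], [0, 1, 2]]

def Spec_coverageOfMatrix (mat : List (List Int)) (out : Int) : Prop := out = coverageOfMatrix_alt mat
instance (mat : List (List Int)) (out : Int) : Decidable (Spec_coverageOfMatrix mat out) := by unfold Spec_coverageOfMatrix; infer_instance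

-- ===== CLAIM (what is proved, stated in full; the proofs are below) =====
def Claim_equal_coverageOfMatrix : Prop := ∀ (mat : List (List Int)), Dom_coverageOfMatrix mat → Pre_coverageOfMatrix mat → Spec_coverageOfMatrix mat (coverageOfMatrix mat)

-- ===== LEMMAS AND PROOFS =====
-- The two ports are equal on ALL inputs (each edge of the grid-adjacency relation is
-- counted once by either program); Pre_ only marks where the Pythons return at all.
def pvV (mat : List (List Int)) (i j : Nat) : Int := (mat.getD i []).getD j 0

theorem pvAt_cast (mat : List (List Int)) (a b : Nat) :
    pvAt mat (a : Int) (b : Int) = pvV mat a b := by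
  simp [pvAt, pvV, PySem.List.pyGetD_natCast]

theorem pv_foldl_sum (n : Nat) (f : Int → Int) (a : Int)
    (body : Int → Int → Int) (h : ∀ c x, body c x = c + f x) :
    (PySem.List.pyRange 0 (n : Int) 1).foldl body a
      = a + ∑ k ∈ Finset.range n, f (k : Int) := by
  have hb : body = fun c x => c + f x := by funext c x; exact h c x
  subst hb
  rw [PySem.List.foldl_add, PySem.List.pyRange_zero_nat, List.map_map]
  congr 1

theorem pv_shift_up (R : Nat) (g : Nat → Int) :
    ∑ i ∈ Finset.range R, (if 1 ≤ i then g (i-1) else 0)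
      = ∑ i ∈ Finset.range R, (if i+1 < R then g i else 0) := by
  cases R with
  | zero => simp
  | succ S =>
    have hL : ∑ i ∈ Finset.range (S+1), (if 1 ≤ i then g (i-1) else 0)
        = ∑ i ∈ Finset.range S, g i := by
      rw [Finset.sum_range_succ']; simp
    have hR : ∑ i ∈ Finset.range (S+1), (if i+1 < S+1 then g i else 0)
        = ∑ i ∈ Finset.range S, g i := by
      rw [Finset.sum_range_succ, if_neg (by omega), add_zero]
      exact Finset.sum_congr rfl fun i hi =>
        if_pos (by have := Finset.mem_range.mp hi; omega)
    rw [hL, hR]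

theorem pv_shift_down (R : Nat) (g : Nat → Int) :
    ∑ i ∈ Finset.range R, (if i+1 < R then g (i+1) else 0)
      = ∑ i ∈ Finset.range R, (if 1 ≤ i then g i else 0) := by
  cases R with
  | zero => simp
  | succ S =>
    have hL : ∑ i ∈ Finset.range (S+1), (if i+1 < S+1 then g (i+1) else 0)
        = ∑ i ∈ Finset.range S, g (i+1) := by
      rw [Finset.sum_range_succ, if_neg (by omega), add_zero]
      exact Finset.sum_congr rfl fun i hi =>
        if_pos (by have := Finset.mem_range.mp hi; omega)
    have hR : ∑ i ∈ Finset.range (S+1), (if 1 ≤ i then g i else 0)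
        = ∑ i ∈ Finset.range S, g (i+1) := by
      rw [Finset.sum_range_succ']; simp
    rw [hL, hR]

theorem pv_pull (C : Nat) (P : Prop) [Decidable P] (g : Nat → Int) :
    ∑ j ∈ Finset.range C, (if P ∧ g j = 1 then (1:Int) else 0)
      = if P then ∑ j ∈ Finset.range C, (if g j = 1 then (1:Int) else 0) else 0 := by
  by_cases hP : P <;> simp [hP]

set_option maxHeartbeats 1000000 in
theorem pv_core (v : Nat → Nat → Int) (R C : Nat) :
    ∑ i ∈ Finset.range R, ∑ j ∈ Finset.range C,
      ((if 1 ≤ i ∧ v (i-1) j = 1 then (1:Int) else 0)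
      + (if j+1 < C ∧ v i (j+1) = 1 then 1 else 0)
      + (if i+1 < R ∧ v (i+1) j = 1 then 1 else 0)
      + (if 1 ≤ j ∧ v i (j-1) = 1 then 1 else 0))
    = ∑ i ∈ Finset.range R, ∑ j ∈ Finset.range C,
      (if v i j = 1 then
        (if 1 ≤ i then (1:Int) else 0) + (if i+1 < R then 1 else 0)
        + (if 1 ≤ j then 1 else 0) + (if j+1 < C then 1 else 0)
       else 0) := by
  have G : Nat → Int := fun i => ∑ j ∈ Finset.range C, (if v i j = 1 then (1:Int) else 0)
  -- distribute both sides into four separate double sums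
  have lhs_eq :
      ∑ i ∈ Finset.range R, ∑ j ∈ Finset.range C,
        ((if 1 ≤ i ∧ v (i-1) j = 1 then (1:Int) else 0)
        + (if j+1 < C ∧ v i (j+1) = 1 then 1 else 0)
        + (if i+1 < R ∧ v (i+1) j = 1 then 1 else 0)
        + (if 1 ≤ j ∧ v i (j-1) = 1 then 1 else 0))
      = (∑ i ∈ Finset.range R, ∑ j ∈ Finset.range C, (if 1 ≤ i ∧ v (i-1) j = 1 then (1:Int) else 0))
      + (∑ i ∈ Finset.range R, ∑ j ∈ Finset.range C, (if j+1 < C ∧ v i (j+1) = 1 then (1:Int) else 0))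
      + (∑ i ∈ Finset.range R, ∑ j ∈ Finset.range C, (if i+1 < R ∧ v (i+1) j = 1 then (1:Int) else 0))
      + (∑ i ∈ Finset.range R, ∑ j ∈ Finset.range C, (if 1 ≤ j ∧ v i (j-1) = 1 then (1:Int) else 0)) := by
    simp [Finset.sum_add_distrib]
  have rhs_eq :
      ∑ i ∈ Finset.range R, ∑ j ∈ Finset.range C,
        (if v i j = 1 then
          (if 1 ≤ i then (1:Int) else 0) + (if i+1 < R then 1 else 0)
          + (if 1 ≤ j then 1 else 0) + (if j+1 < C then 1 else 0)
         else 0)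
      = (∑ i ∈ Finset.range R, ∑ j ∈ Finset.range C, (if 1 ≤ i ∧ v i j = 1 then (1:Int) else 0))
      + (∑ i ∈ Finset.range R, ∑ j ∈ Finset.range C, (if i+1 < R ∧ v i j = 1 then (1:Int) else 0))
      + (∑ i ∈ Finset.range R, ∑ j ∈ Finset.range C, (if 1 ≤ j ∧ v i j = 1 then (1:Int) else 0))
      + (∑ i ∈ Finset.range R, ∑ j ∈ Finset.range C, (if j+1 < C ∧ v i j = 1 then (1:Int) else 0)) := by
    rw [← Finset.sum_add_distrib, ← Finset.sum_add_distrib, ← Finset.sum_add_distrib]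
    refine Finset.sum_congr rfl fun i _ => ?_
    rw [← Finset.sum_add_distrib, ← Finset.sum_add_distrib, ← Finset.sum_add_distrib]
    refine Finset.sum_congr rfl fun j _ => ?_
    split_ifs <;> omega
  rw [lhs_eq, rhs_eq]
  -- four matching pieces
  have t1 : ∑ i ∈ Finset.range R, ∑ j ∈ Finset.range C, (if 1 ≤ i ∧ v (i-1) j = 1 then (1:Int) else 0)
      = ∑ i ∈ Finset.range R, ∑ j ∈ Finset.range C, (if i+1 < R ∧ v i j = 1 then (1:Int) else 0) := by
    calc ∑ i ∈ Finset.range R, ∑ j ∈ Finset.range C, (if 1 ≤ i ∧ v (i-1) j = 1 then (1:Int) else 0)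
        = ∑ i ∈ Finset.range R, (if 1 ≤ i then (fun k => ∑ j ∈ Finset.range C, (if v k j = 1 then (1:Int) else 0)) (i-1) else 0) := by
          exact Finset.sum_congr rfl fun i _ => pv_pull C (1 ≤ i) (v (i-1))
      _ = ∑ i ∈ Finset.range R, (if i+1 < R then ∑ j ∈ Finset.range C, (if v i j = 1 then (1:Int) else 0) else 0) := by
          simpa only [] using pv_shift_up R (fun k => ∑ j ∈ Finset.range C, (if v k j = 1 then (1:Int) else 0))
      _ = ∑ i ∈ Finset.range R, ∑ j ∈ Finset.range C, (if i+1 < R ∧ v i j = 1 then (1:Int) else 0) := by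
          exact Finset.sum_congr rfl fun i _ => (pv_pull C (i+1 < R) (v i)).symm
  have t3 : ∑ i ∈ Finset.range R, ∑ j ∈ Finset.range C, (if i+1 < R ∧ v (i+1) j = 1 then (1:Int) else 0)
      = ∑ i ∈ Finset.range R, ∑ j ∈ Finset.range C, (if 1 ≤ i ∧ v i j = 1 then (1:Int) else 0) := by
    calc ∑ i ∈ Finset.range R, ∑ j ∈ Finset.range C, (if i+1 < R ∧ v (i+1) j = 1 then (1:Int) else 0)
        = ∑ i ∈ Finset.range R, (if i+1 < R then (fun k => ∑ j ∈ Finset.range C, (if v k j = 1 then (1:Int) else 0)) (i+1) else 0) := by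
          exact Finset.sum_congr rfl fun i _ => pv_pull C (i+1 < R) (v (i+1))
      _ = ∑ i ∈ Finset.range R, (if 1 ≤ i then ∑ j ∈ Finset.range C, (if v i j = 1 then (1:Int) else 0) else 0) := by
          simpa only [] using pv_shift_down R (fun k => ∑ j ∈ Finset.range C, (if v k j = 1 then (1:Int) else 0))
      _ = ∑ i ∈ Finset.range R, ∑ j ∈ Finset.range C, (if 1 ≤ i ∧ v i j = 1 then (1:Int) else 0) := by
          exact Finset.sum_congr rfl fun i _ => (pv_pull C (1 ≤ i) (v i)).symm
  have t2 : ∑ i ∈ Finset.range R, ∑ j ∈ Finset.range C, (if j+1 < C ∧ v i (j+1) = 1 then (1:Int) else 0)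
      = ∑ i ∈ Finset.range R, ∑ j ∈ Finset.range C, (if 1 ≤ j ∧ v i j = 1 then (1:Int) else 0) := by
    refine Finset.sum_congr rfl fun i _ => ?_
    calc ∑ j ∈ Finset.range C, (if j+1 < C ∧ v i (j+1) = 1 then (1:Int) else 0)
        = ∑ j ∈ Finset.range C, (if j+1 < C then (fun k => if v i k = 1 then (1:Int) else 0) (j+1) else 0) := by
          exact Finset.sum_congr rfl fun j _ => by rw [ite_and]
      _ = ∑ j ∈ Finset.range C, (if 1 ≤ j then (if v i j = 1 then (1:Int) else 0) else 0) := by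
          simpa only [] using pv_shift_down C (fun k => if v i k = 1 then (1:Int) else 0)
      _ = ∑ j ∈ Finset.range C, (if 1 ≤ j ∧ v i j = 1 then (1:Int) else 0) := by
          exact Finset.sum_congr rfl fun j _ => by rw [ite_and]
  have t4 : ∑ i ∈ Finset.range R, ∑ j ∈ Finset.range C, (if 1 ≤ j ∧ v i (j-1) = 1 then (1:Int) else 0)
      = ∑ i ∈ Finset.range R, ∑ j ∈ Finset.range C, (if j+1 < C ∧ v i j = 1 then (1:Int) else 0) := by
    refine Finset.sum_congr rfl fun i _ => ?_
    calc ∑ j ∈ Finset.range C, (if 1 ≤ j ∧ v i (j-1) = 1 then (1:Int) else 0)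
        = ∑ j ∈ Finset.range C, (if 1 ≤ j then (fun k => if v i k = 1 then (1:Int) else 0) (j-1) else 0) := by
          exact Finset.sum_congr rfl fun j _ => by rw [ite_and]
      _ = ∑ j ∈ Finset.range C, (if j+1 < C then (if v i j = 1 then (1:Int) else 0) else 0) := by
          simpa only [] using pv_shift_up C (fun k => if v i k = 1 then (1:Int) else 0)
      _ = ∑ j ∈ Finset.range C, (if j+1 < C ∧ v i j = 1 then (1:Int) else 0) := by
          exact Finset.sum_congr rfl fun j _ => by rw [ite_and]
  rw [t1, t2, t3, t4]
  ring

def pvTA (mat : List (List Int)) (i j : Int) : Int :=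
  (if 0 ≤ i - 1 ∧ pvAt mat (i-1) j = 1 then (1:Int) else 0)
  + (if j + 1 < ((PySem.List.pyGetD mat 0 []).length : Int) ∧ pvAt mat i (j+1) = 1 then 1 else 0)
  + (if i + 1 < (mat.length : Int) ∧ pvAt mat (i+1) j = 1 then 1 else 0)
  + (if 0 ≤ j - 1 ∧ pvAt mat i (j-1) = 1 then 1 else 0)

def pvTB (mat : List (List Int)) (i j : Int) : Int :=
  if pvAt mat i j = 1 then
    (if 0 < i then (1:Int) else 0) + (if i < (mat.length : Int) - 1 then 1 else 0)
    + (if 0 < j then 1 else 0) + (if j < ((PySem.List.pyGetD mat 0 []).length : Int) - 1 then 1 else 0)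
  else 0

theorem pv_A_sum (mat : List (List Int)) :
    coverageOfMatrix mat
      = ∑ i ∈ Finset.range mat.length,
          ∑ j ∈ Finset.range (PySem.List.pyGetD mat 0 []).length, pvTA mat ↑i ↑j := by
  simp only [coverageOfMatrix]
  refine Eq.trans (pv_foldl_sum mat.length
      (fun i => ∑ j ∈ Finset.range (PySem.List.pyGetD mat 0 []).length, pvTA mat i ↑j) 0 _ ?_)
    (zero_add _)
  intro c i
  refine Eq.trans (pv_foldl_sum (PySem.List.pyGetD mat 0 []).length
      (fun j => pvTA mat i j) c _ ?_) rfl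
  intro c' j
  unfold pvTA
  dsimp only
  split_ifs <;> ring

theorem pv_B_sum (mat : List (List Int)) :
    coverageOfMatrix_alt mat
      = ∑ i ∈ Finset.range mat.length,
          ∑ j ∈ Finset.range (PySem.List.pyGetD mat 0 []).length, pvTB mat ↑i ↑j := by
  simp only [coverageOfMatrix_alt]
  refine Eq.trans (pv_foldl_sum mat.length
      (fun i => ∑ j ∈ Finset.range (PySem.List.pyGetD mat 0 []).length, pvTB mat i ↑j) 0 _ ?_)
    (zero_add _)
  intro c i
  refine Eq.trans (pv_foldl_sum (PySem.List.pyGetD mat 0 []).length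
      (fun j => pvTB mat i j) c _ ?_) rfl
  intro c' j
  unfold pvTB pvAt
  dsimp only
  split_ifs <;> ring

theorem pv_a1 (mat : List (List Int)) (i j : Nat) :
    (if 0 ≤ (i:Int) - 1 ∧ pvAt mat ((i:Int)-1) (j:Int) = 1 then (1:Int) else 0)
      = (if 1 ≤ i ∧ pvV mat (i-1) j = 1 then (1:Int) else 0) := by
  by_cases h : 1 ≤ i
  · have hc : ((i:Int) - 1) = ((i-1 : Nat) : Int) := by omega
    rw [hc, pvAt_cast]
    simp [h]
  · have h0 : i = 0 := by omega
    subst h0; simp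

theorem pv_a4 (mat : List (List Int)) (i j : Nat) :
    (if 0 ≤ (j:Int) - 1 ∧ pvAt mat (i:Int) ((j:Int)-1) = 1 then (1:Int) else 0)
      = (if 1 ≤ j ∧ pvV mat i (j-1) = 1 then (1:Int) else 0) := by
  by_cases h : 1 ≤ j
  · have hc : ((j:Int) - 1) = ((j-1 : Nat) : Int) := by omega
    rw [hc, pvAt_cast]
    simp [h]
  · have h0 : j = 0 := by omega
    subst h0; simp

theorem pv_a2 (mat : List (List Int)) (C : Nat) (i j : Nat) :
    (if (j:Int) + 1 < (C : Int) ∧ pvAt mat (i:Int) ((j:Int)+1) = 1 then (1:Int) else 0)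
      = (if j+1 < C ∧ pvV mat i (j+1) = 1 then (1:Int) else 0) := by
  have hc : ((j:Int) + 1) = ((j+1 : Nat) : Int) := by push_cast; ring
  rw [hc, pvAt_cast]
  have hlt : (((j+1:Nat):Int) < (C:Int)) ↔ (j+1 < C) := by omega
  simp only [hlt]

theorem pv_a3 (mat : List (List Int)) (R : Nat) (i j : Nat) :
    (if (i:Int) + 1 < (R : Int) ∧ pvAt mat ((i:Int)+1) (j:Int) = 1 then (1:Int) else 0)
      = (if i+1 < R ∧ pvV mat (i+1) j = 1 then (1:Int) else 0) := by
  have hc : ((i:Int) + 1) = ((i+1 : Nat) : Int) := by push_cast; ring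
  rw [hc, pvAt_cast]
  have hlt : (((i+1:Nat):Int) < (R:Int)) ↔ (i+1 < R) := by omega
  simp only [hlt]

theorem pv_A_nat (mat : List (List Int)) (i j : Nat) :
    pvTA mat ↑i ↑j
      = (if 1 ≤ i ∧ pvV mat (i-1) j = 1 then (1:Int) else 0)
      + (if j+1 < (PySem.List.pyGetD mat 0 []).length ∧ pvV mat i (j+1) = 1 then 1 else 0)
      + (if i+1 < mat.length ∧ pvV mat (i+1) j = 1 then 1 else 0)
      + (if 1 ≤ j ∧ pvV mat i (j-1) = 1 then 1 else 0) := by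
  unfold pvTA
  rw [pv_a1, pv_a2, pv_a3, pv_a4]

theorem pv_B_nat (mat : List (List Int)) (i j : Nat) :
    pvTB mat ↑i ↑j
      = (if pvV mat i j = 1 then
          (if 1 ≤ i then (1:Int) else 0) + (if i+1 < mat.length then 1 else 0)
          + (if 1 ≤ j then 1 else 0) + (if j+1 < (PySem.List.pyGetD mat 0 []).length then 1 else 0)
         else 0) := by
  unfold pvTB
  rw [pvAt_cast]
  have h1 : (0 < (i:Int)) ↔ 1 ≤ i := by omega
  have h2 : ((i:Int) < (mat.length:Int) - 1) ↔ i+1 < mat.length := by omega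
  have h3 : (0 < (j:Int)) ↔ 1 ≤ j := by omega
  have h4 : ((j:Int) < ((PySem.List.pyGetD mat 0 []).length:Int) - 1)
      ↔ j+1 < (PySem.List.pyGetD mat 0 []).length := by omega
  simp only [h1, h2, h3, h4]

theorem pv_eq (mat : List (List Int)) : coverageOfMatrix mat = coverageOfMatrix_alt mat := by
  rw [pv_A_sum, pv_B_sum]
  calc ∑ i ∈ Finset.range mat.length,
          ∑ j ∈ Finset.range (PySem.List.pyGetD mat 0 []).length, pvTA mat ↑i ↑j
      = ∑ i ∈ Finset.range mat.length,
          ∑ j ∈ Finset.range (PySem.List.pyGetD mat 0 []).length,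
            ((if 1 ≤ i ∧ pvV mat (i-1) j = 1 then (1:Int) else 0)
            + (if j+1 < (PySem.List.pyGetD mat 0 []).length ∧ pvV mat i (j+1) = 1 then 1 else 0)
            + (if i+1 < mat.length ∧ pvV mat (i+1) j = 1 then 1 else 0)
            + (if 1 ≤ j ∧ pvV mat i (j-1) = 1 then 1 else 0)) :=
        Finset.sum_congr rfl fun i _ => Finset.sum_congr rfl fun j _ => pv_A_nat mat i j
    _ = ∑ i ∈ Finset.range mat.length,
          ∑ j ∈ Finset.range (PySem.List.pyGetD mat 0 []).length,
            (if pvV mat i j = 1 then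
              (if 1 ≤ i then (1:Int) else 0) + (if i+1 < mat.length then 1 else 0)
              + (if 1 ≤ j then 1 else 0) + (if j+1 < (PySem.List.pyGetD mat 0 []).length then 1 else 0)
             else 0) :=
        pv_core (pvV mat) mat.length (PySem.List.pyGetD mat 0 []).length
    _ = ∑ i ∈ Finset.range mat.length,
          ∑ j ∈ Finset.range (PySem.List.pyGetD mat 0 []).length, pvTB mat ↑i ↑j :=
        (Finset.sum_congr rfl fun i _ => Finset.sum_congr rfl fun j _ => (pv_B_nat mat i j).symm)

-- ===== VERDICT (by name: the statement is the Claim_ definition above) =====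
theorem coverageOfMatrix_spec : Claim_equal_coverageOfMatrix := by
  intro mat _ _
  unfold Spec_coverageOfMatrix
  exact pv_eq mat
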